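-- pv_equiv track=rewrite | github.com/FNA2003/grupo1-tp1-v1 | lexer/AFDs.py | afd_punto_y_coma
-- ===== SOURCE A (Python) =====
-- def afd_punto_y_coma(cadena):
--     """El estado aceptado es 1"""
--     estados_sin_trampa = [0, 1]
--     estados_aceptados = [1]
--     estados_no_aceptados = [0]
--     estado_trampa = 't'
--     estado = 0
--     caracteres = [';']
--     delta = {
--     0: {';': 1},
--     1: {';': 't'},
--     't': {';': 't'}
--     }
--
--     for caracter in cadena:
--         if (estado in estados_sin_trampa) and (caracter in caracteres):
--             estado = delta[estado][caracter]
--         elif (estado == 1) or (estado == 't') or not(caracter in caracteres):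
--             estado = 't'
--             break
--
--     if estado in estados_aceptados:
--         estado_final = 'aceptado'
--     elif estado in estados_no_aceptados:
--         estado_final = 'no aceptado'
--     elif estado == estado_trampa:
--         estado_final = 'trampa'
--
--     return estado_final
-- ===== SOURCE B (Python) =====
-- def afd_punto_y_coma(cadena):
--     """El estado aceptado es 1"""
--     caracteres = list(cadena)
--     if caracteres == [';']:
--         return 'aceptado'
--     if not caracteres:
--         return 'no aceptado'
--     return 'trampa'
-- ===== Notes on version B (the rewrite author's own statement) =====
-- stated objective: simpler
-- what changed: Replaces the transition-table DFA state loop with a direct closed-form comparison of the materialized input against [';'] and [].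
import Mathlib
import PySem

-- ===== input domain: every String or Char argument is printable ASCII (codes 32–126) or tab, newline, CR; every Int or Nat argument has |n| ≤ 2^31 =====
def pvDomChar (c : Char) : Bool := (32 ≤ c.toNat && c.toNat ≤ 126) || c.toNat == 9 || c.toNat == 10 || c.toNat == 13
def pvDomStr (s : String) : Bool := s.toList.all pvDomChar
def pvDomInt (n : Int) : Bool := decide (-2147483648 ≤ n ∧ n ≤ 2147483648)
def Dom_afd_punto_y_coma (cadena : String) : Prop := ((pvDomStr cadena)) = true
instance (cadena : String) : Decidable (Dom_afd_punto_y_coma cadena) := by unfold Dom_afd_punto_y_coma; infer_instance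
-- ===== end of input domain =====

-- B replaces A's transition-table DFA loop by a direct comparison of the input's
-- character list with [';'] / [] (objective: simpler).

-- ===== PORT A =====
-- A's states 0, 1, 't'
inductive PvEst
  | s0
  | s1
  | t
deriving DecidableEq, Repr

-- delta = {0: {';': 1}, 1: {';': 't'}, 't': {';': 't'}}  (only ever consulted on ';')
def pvDelta (est : PvEst) : PvEst :=
  match est with
  | PvEst.s0 => PvEst.s1
  | PvEst.s1 => PvEst.t
  | PvEst.t => PvEst.t

-- the 'for caracter in cadena' loop with its break
def pvLoopA (est : PvEst) (cs : List Char) : PvEst :=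
  match cs with
  | [] => est
  | c :: rest =>
    if ((est = PvEst.s0 ∨ est = PvEst.s1) ∧ c = ';') then
      pvLoopA (pvDelta est) rest
    else
      -- elif estado == 1 or estado == 't' or not (caracter in caracteres): estado = 't'; break
      PvEst.t

def afd_punto_y_coma (cadena : String) : String :=
  let estado := pvLoopA PvEst.s0 cadena.toList
  if estado = PvEst.s1 then "aceptado"
  else if estado = PvEst.s0 then "no aceptado"
  else "trampa"

-- ===== PORT B =====
def afd_punto_y_coma_alt (cadena : String) : String :=
  let caracteres := cadena.toList
  if caracteres = [';'] then "aceptado"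
  else if caracteres = [] then "no aceptado"
  else "trampa"

-- ===== PRECONDITION & SPEC =====
def Spec_afd_punto_y_coma (cadena : String) (out : String) : Prop := out = afd_punto_y_coma_alt cadena
instance (cadena : String) (out : String) : Decidable (Spec_afd_punto_y_coma cadena out) := by unfold Spec_afd_punto_y_coma; infer_instance

-- ===== CLAIM (what is proved, stated in full; the proofs are below) =====
def Claim_equal_afd_punto_y_coma : Prop := ∀ (cadena : String), Dom_afd_punto_y_coma cadena → Spec_afd_punto_y_coma cadena (afd_punto_y_coma cadena)

-- ===== LEMMAS AND PROOFS =====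

theorem pvLoopA_t (cs : List Char) : pvLoopA PvEst.t cs = PvEst.t := by
  cases cs with
  | nil => rfl
  | cons c rest => simp [pvLoopA]

-- ===== VERDICT (by name: the statement is the Claim_ definition above) =====
theorem afd_punto_y_coma_spec : Claim_equal_afd_punto_y_coma := by
  intro cadena _
  unfold Spec_afd_punto_y_coma afd_punto_y_coma afd_punto_y_coma_alt
  cases h : cadena.toList with
  | nil => simp [pvLoopA]
  | cons c rest =>
    by_cases hc : c = ';'
    · cases rest with
      | nil => simp [pvLoopA, hc, pvDelta]
      | cons d rest' =>
        by_cases hd : d = ';'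
        · simp [pvLoopA, hc, hd, pvDelta, pvLoopA_t]
        · simp [pvLoopA, hc, hd, pvDelta]
    · simp [pvLoopA, hc]
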